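-- pv_equiv track=rewrite | github.com/uTakCouDeT/Linux-Audit-Viewer | audit_viewer/parser.py | _choose_main_record
-- ===== SOURCE A (Python) =====
-- from typing import Any, Dict, List, Optional, Tuple
--
-- def _choose_main_record(event_records: List[Dict[str, Any]]) -> Dict[str, Any]:
--     """
--     Выбирает "основную" запись события, на основе которой формируется summary.
--
--     Приоритет:
--         1) SYSCALL  — для системных вызовов и файловых операций;
--         2) USER_AUTH / USER_LOGIN — для аутентификации и логинов;
--         3) первая запись в списке.
--     """
--     # 1. SYSCALL
--     for rec in event_records:
--         if rec["type"] == "SYSCALL":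
--             return rec
--
--     # 2. USER_AUTH / USER_LOGIN
--     for rec in event_records:
--         if rec["type"] in ("USER_AUTH", "USER_LOGIN"):
--             return rec
--
--     # 3. fallback: первая запись
--     return event_records[0]
-- ===== SOURCE B (Python) =====
-- from typing import Any, Dict, List
--
-- def _choose_main_record(event_records: List[Dict[str, Any]]) -> Dict[str, Any]:
--     auth = None
--     for rec in event_records:
--         t = rec["type"]
--         if t == "SYSCALL":
--             return rec
--         if auth is None and t in ("USER_AUTH", "USER_LOGIN"):
--             auth = rec
--     if auth is not None:
--         return auth
--     return event_records[0]
-- ===== Notes on version B (the rewrite author's own statement) =====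
-- stated objective: simpler
-- what changed: Replaces A's two sequential scans by a single pass that returns the first SYSCALL record immediately while remembering the first USER_AUTH/USER_LOGIN record as a candidate, falling back to the first record.
import Mathlib
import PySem

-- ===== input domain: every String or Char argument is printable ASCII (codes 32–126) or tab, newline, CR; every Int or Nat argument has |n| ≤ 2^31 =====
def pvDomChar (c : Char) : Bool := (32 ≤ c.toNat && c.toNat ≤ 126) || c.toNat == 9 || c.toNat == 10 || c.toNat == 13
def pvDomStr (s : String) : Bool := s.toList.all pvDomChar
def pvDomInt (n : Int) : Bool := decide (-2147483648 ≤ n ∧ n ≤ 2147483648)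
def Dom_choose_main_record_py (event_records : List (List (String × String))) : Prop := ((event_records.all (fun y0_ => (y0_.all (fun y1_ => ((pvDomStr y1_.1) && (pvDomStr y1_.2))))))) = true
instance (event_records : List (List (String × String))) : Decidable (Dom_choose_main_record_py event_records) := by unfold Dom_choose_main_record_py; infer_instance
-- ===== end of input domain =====

-- B replaces A's two sequential scans by one pass (return first SYSCALL at once, remember the
-- first USER_AUTH/USER_LOGIN as a candidate); objective: simpler. Return-value equivalence only.

-- ===== PORT A =====
-- rec["type"] on an association list = first match; `none` would be Python's KeyError (excluded by Pre_).
def choose_main_record_py (event_records : List (List (String × String))) : List (String × String) :=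
  -- 1. SYSCALL: first loop, returning the first match
  match event_records.find? (fun rec => List.lookup "type" rec == some "SYSCALL") with
  | some rec => rec
  | none =>
    -- 2. USER_AUTH / USER_LOGIN: second loop
    match event_records.find? (fun rec =>
        List.lookup "type" rec == some "USER_AUTH" || List.lookup "type" rec == some "USER_LOGIN") with
    | some rec => rec
    | none =>
      -- 3. fallback: event_records[0]; none = IndexError, excluded by Pre_
      (PySem.List.pyGet? event_records 0).getD []

-- ===== PORT B =====
-- single pass: return first SYSCALL immediately, keep the first auth record as candidate
def pvAltGo : List (List (String × String)) → Option (List (String × String)) → Option (List (String × String))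
  | [], auth => auth
  | rec :: rest, auth =>
    let t := List.lookup "type" rec
    if t == some "SYSCALL" then some rec
    else pvAltGo rest
      (if auth.isNone && (t == some "USER_AUTH" || t == some "USER_LOGIN") then some rec else auth)

def choose_main_record_py_alt (event_records : List (List (String × String))) : List (String × String) :=
  match pvAltGo event_records none with
  | some rec => rec
  | none => (PySem.List.pyGet? event_records 0).getD []

-- ===== PRECONDITION & SPEC =====
-- Pre_ excludes exactly the inputs where Python A raises: the empty list (IndexError) and lists in
-- which a record without a "type" key occurs before any SYSCALL record (KeyError).
def Pre_choose_main_record_py (event_records : List (List (String × String))) : Prop :=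
  event_records ≠ [] ∧
    ∀ rec ∈ event_records.takeWhile (fun r => !(List.lookup "type" r == some "SYSCALL")),
      (List.lookup "type" rec).isSome
instance (event_records : List (List (String × String))) : Decidable (Pre_choose_main_record_py event_records) := by unfold Pre_choose_main_record_py; infer_instance

def pvWitness_choose_main_record_py : (List (List (String × String))) :=
  [[("type", "CWD")], [("type", "USER_AUTH")], [("type", "SYSCALL")]]

def Spec_choose_main_record_py (event_records : List (List (String × String))) (out : List (String × String)) : Prop := out = choose_main_record_py_alt event_records
instance (event_records : List (List (String × String))) (out : List (String × String)) : Decidable (Spec_choose_main_record_py event_records out) := by unfold Spec_choose_main_record_py; infer_instance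

-- ===== CLAIM (what is proved, stated in full; the proofs are below) =====
def Claim_equal_choose_main_record_py : Prop := ∀ (event_records : List (List (String × String))), Dom_choose_main_record_py event_records → Pre_choose_main_record_py event_records → Spec_choose_main_record_py event_records (choose_main_record_py event_records)

-- ===== LEMMAS AND PROOFS =====

-- the single pass equals: first SYSCALL, else the pending candidate, else the first auth record
theorem pvAltGo_eq (rs : List (List (String × String))) (auth : Option (List (String × String))) :
    pvAltGo rs auth =
      Option.or (rs.find? (fun rec => List.lookup "type" rec == some "SYSCALL"))
        (Option.or auth (rs.find? (fun rec =>
          List.lookup "type" rec == some "USER_AUTH" || List.lookup "type" rec == some "USER_LOGIN"))) := by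
  induction rs generalizing auth with
  | nil => simp [pvAltGo]
  | cons rec rest ih =>
    simp only [pvAltGo, List.find?]
    by_cases hs : (List.lookup "type" rec == some "SYSCALL") = true
    · simp [hs]
    · simp only [hs, Bool.false_eq_true, if_false, ih]
      cases auth with
      | some a => simp
      | none =>
        by_cases ha : (List.lookup "type" rec == some "USER_AUTH"
            || List.lookup "type" rec == some "USER_LOGIN") = true
        · simp [ha]
        · simp [ha]

-- ===== VERDICT (by name: the statement is the Claim_ definition above) =====
theorem choose_main_record_py_spec : Claim_equal_choose_main_record_py := by
  intro rs _hdom _hpre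
  unfold Spec_choose_main_record_py choose_main_record_py choose_main_record_py_alt
  rw [pvAltGo_eq]
  cases rs.find? (fun rec => List.lookup "type" rec == some "SYSCALL") with
  | some r => rfl
  | none =>
    cases rs.find? (fun rec =>
        List.lookup "type" rec == some "USER_AUTH" || List.lookup "type" rec == some "USER_LOGIN") with
    | some r => rfl
    | none => rfl
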